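-- pv_equiv track=rewrite | github.com/stephane-delire/Memoire-implementation | cqa/sources/ngfo.py | _is_self_join_free
-- ===== SOURCE A (Python) =====
-- def _is_self_join_free(q_plus):
--     """
--     Vérifie si la requête est self-join free.
--     Une requête est self-join free si elle ne contient pas de jointures sur
--     elle-même. (aucun prédicat positif n'apparait plus d'une fois).
--
--     :param q_plus: Liste des atomes positifs.
--     :return: True si la requête est self-join free, False sinon.
--     """
--     seen = set()
--     for atom in q_plus:
--         pred = atom[1]
--         if pred in seen:
--             return False
--         seen.add(pred)
--     return True
-- ===== SOURCE B (Python) =====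
-- def _is_self_join_free(q_plus):
--     preds = sorted(atom[1] for atom in q_plus)
--     return all(a != b for a, b in zip(preds, preds[1:]))
-- ===== Notes on version B (the rewrite author's own statement) =====
-- stated objective: alternative
-- what changed: Replaces the hash-set membership loop with sort-then-adjacent-scan: sort the predicates and check that no two neighbours are equal (duplicates become adjacent after sorting).
import Mathlib
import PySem

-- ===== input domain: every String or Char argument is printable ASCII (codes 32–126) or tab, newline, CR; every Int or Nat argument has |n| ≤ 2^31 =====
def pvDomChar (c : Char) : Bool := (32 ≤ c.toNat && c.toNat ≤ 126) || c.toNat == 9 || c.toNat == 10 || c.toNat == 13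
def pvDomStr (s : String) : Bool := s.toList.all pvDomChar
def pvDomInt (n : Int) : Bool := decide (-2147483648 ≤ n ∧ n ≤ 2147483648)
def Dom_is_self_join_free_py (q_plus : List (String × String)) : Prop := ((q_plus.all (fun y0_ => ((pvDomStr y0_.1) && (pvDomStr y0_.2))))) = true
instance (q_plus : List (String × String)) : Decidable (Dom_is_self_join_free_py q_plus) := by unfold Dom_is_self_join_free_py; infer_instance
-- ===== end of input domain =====

-- B replaces A's incremental seen-set loop by sort-then-adjacent-scan: sort the predicates, then check no two neighbours are equal (alternative algorithm; same return value).


-- ===== PORT A =====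
def isSjfLoop (l : List (String × String)) (seen : PySem.Set String) : Bool :=
  match l with
  | [] => true
  | atom :: rest =>
    if seen.contains atom.2 then false
    else isSjfLoop rest (seen.add atom.2)

def is_self_join_free_py (q_plus : List (String × String)) : Bool :=
  isSjfLoop q_plus PySem.Set.empty

-- ===== PORT B =====
-- preds = sorted(atom[1] for atom in q_plus); zip(preds, preds[1:]) is preds.zip (preds.drop 1) (exact: nonnegative slice start)
def is_self_join_free_py_alt (q_plus : List (String × String)) : Bool :=
  let preds := PySem.List.sorted (q_plus.map (fun atom => atom.2)) (fun x => x) false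
  (preds.zip (preds.drop 1)).all (fun p => p.1 != p.2)

-- ===== PRECONDITION & SPEC =====
def Spec_is_self_join_free_py (q_plus : List (String × String)) (out : Bool) : Prop := out = is_self_join_free_py_alt q_plus
instance (q_plus : List (String × String)) (out : Bool) : Decidable (Spec_is_self_join_free_py q_plus out) := by unfold Spec_is_self_join_free_py; infer_instance

-- ===== CLAIM (what is proved, stated in full; the proofs are below) =====
def Claim_equal_is_self_join_free_py : Prop := ∀ (q_plus : List (String × String)), Dom_is_self_join_free_py q_plus → Spec_is_self_join_free_py q_plus (is_self_join_free_py q_plus)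

-- ===== LEMMAS AND PROOFS =====

-- A's loop returns true iff the predicates are distinct and disjoint from `seen`.
lemma isSjfLoop_eq_true_iff (l : List (String × String)) (seen : PySem.Set String) :
    isSjfLoop l seen = true ↔
      (l.map Prod.snd).Nodup ∧ ∀ x ∈ l.map Prod.snd, x ∉ seen := by
  induction l generalizing seen with
  | nil => simp [isSjfLoop]
  | cons a l ih =>
    by_cases h : a.2 ∈ seen
    · simp only [isSjfLoop, if_pos ((PySem.Set.contains_iff seen a.2).mpr h)]
      simp only [List.map_cons, List.nodup_cons, List.mem_cons]
      constructor
      · intro hf; exact absurd hf (by simp)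
      · rintro ⟨-, hd⟩; exact absurd h (hd a.2 (Or.inl rfl))
    · have hc : ¬ PySem.Set.contains seen a.2 = true := fun hh =>
        h ((PySem.Set.contains_iff seen a.2).mp hh)
      simp only [isSjfLoop, if_neg hc, ih, List.map_cons, List.nodup_cons,
        List.mem_cons]
      constructor
      · rintro ⟨hnd, hall⟩
        have hmem : ∀ x ∈ l.map Prod.snd, x ≠ a.2 ∧ x ∉ seen := by
          intro x hx
          have := hall x hx
          rw [PySem.Set.mem_add] at this
          push Not at this
          exact ⟨this.2, this.1⟩
        refine ⟨⟨fun hx => (hmem _ hx).1 rfl, hnd⟩, ?_⟩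
        rintro x (rfl | hx)
        · exact h
        · exact (hmem _ hx).2
      · rintro ⟨⟨ha, hnd⟩, hall⟩
        refine ⟨hnd, fun x hx => ?_⟩
        rw [PySem.Set.mem_add]
        push Not
        refine ⟨hall x (Or.inr hx), fun hxa => ha ?_⟩
        rw [← hxa]; exact hx

-- The adjacent-pairs scan is exactly IsChain (· ≠ ·).
lemma zip_tail_all_ne (ys : List String) :
    ((ys.zip (ys.drop 1)).all (fun p => p.1 != p.2)) = true ↔
      List.IsChain (fun a b => a ≠ b) ys := by
  induction ys with
  | nil => simp
  | cons a ys ih =>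
    cases ys with
    | nil => simp
    | cons b t =>
      simp only [List.drop_succ_cons, List.drop_zero, List.zip_cons_cons,
        List.all_cons, Bool.and_eq_true, bne_iff_ne, List.isChain_cons_cons] at *
      rw [ih]

lemma isChain_lt_of_le_ne (ys : List String)
    (h1 : List.IsChain (fun a b : String => a ≤ b) ys)
    (h2 : List.IsChain (fun a b : String => a ≠ b) ys) :
    List.IsChain (fun a b : String => a < b) ys := by
  induction ys with
  | nil => exact List.isChain_nil
  | cons a ys ih =>
    cases ys with
    | nil => exact List.isChain_singleton a
    | cons b t =>
      rw [List.isChain_cons_cons] at h1 h2 ⊢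
      exact ⟨lt_of_le_of_ne h1.1 h2.1, ih h1.2 h2.2⟩

-- On a ≤-sorted list, adjacent distinctness is exactly Nodup.
lemma chain_ne_iff_nodup_of_sorted (ys : List String)
    (hs : ys.Pairwise (fun a b => a ≤ b)) :
    List.IsChain (fun a b => a ≠ b) ys ↔ ys.Nodup := by
  constructor
  · intro hc
    have hlt := isChain_lt_of_le_ne ys hs.isChain hc
    have hpw : ys.Pairwise (fun a b : String => a < b) :=
      (List.isChain_iff_pairwise).mp hlt
    exact hpw.imp ne_of_lt
  · intro hnd
    exact hnd.isChain

-- ===== VERDICT (by name: the statement is the Claim_ definition above) =====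
theorem is_self_join_free_py_spec : Claim_equal_is_self_join_free_py := by
  intro q_plus _
  unfold Spec_is_self_join_free_py is_self_join_free_py is_self_join_free_py_alt
  have hA := isSjfLoop_eq_true_iff q_plus PySem.Set.empty
  simp only [PySem.Set.empty, List.not_mem_nil, not_false_iff, imp_true_iff,
    and_true] at hA
  set preds := PySem.List.sorted (q_plus.map (fun atom => atom.2)) (fun x => x) false with hpreds
  have hperm : preds.Perm (q_plus.map (fun atom => atom.2)) :=
    PySem.List.sorted_perm _ _ _
  have hpw : preds.Pairwise (fun a b => a ≤ b) := by
    have := PySem.List.sorted_pairwise (q_plus.map (fun atom => atom.2)) (fun x => x)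
    simpa [hpreds] using this
  have hB := zip_tail_all_ne preds
  rw [chain_ne_iff_nodup_of_sorted preds hpw, hperm.nodup_iff] at hB
  have hmap : q_plus.map (fun atom => atom.2) = q_plus.map Prod.snd := rfl
  rw [hmap] at hB
  rw [Bool.eq_iff_iff]
  exact hA.trans hB.symm
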